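-- pv_equiv track=rewrite | github.com/PmagPy/PmagPy | dialogs/demag_dialogs.py | merge_pmag_recs
-- ===== SOURCE A (Python) =====
-- import copy
--
-- def merge_pmag_recs(old_recs):
--     # fix the headers of pmag recs
--     recs={}
--     recs=copy.deepcopy(old_recs)
--     headers=[]
--     for rec in recs:
--         for key in list(rec.keys()):
--             if key not in headers:
--                 headers.append(key)
--     for rec in recs:
--         for header in headers:
--             if header not in list(rec.keys()):
--                 rec[header]=""
--     return recs
-- ===== SOURCE B (Python) =====
-- import copy
--
-- def merge_pmag_recs(old_recs):
--     # fix the headers of pmag recs: one recursive traversal; the ordered key-union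
--     # is threaded downward and the final union, returned from the base case,
--     # pads each record on the way back up (output built back-to-front).
--     recs = copy.deepcopy(old_recs)
--
--     def go(pairs, seen):
--         if not pairs:
--             return seen, []
--         head, tail = pairs[0], pairs[1:]
--         nseen = dict(seen)
--         for k in head:
--             nseen[k] = ""
--         final, done = go(tail, nseen)
--         filled = dict(head)
--         for h in final:
--             filled.setdefault(h, "")
--         return final, [filled] + done
--
--     return go(recs, {})[1]
-- ===== Notes on version B (the rewrite author's own statement) =====
-- stated objective: alternative
-- what changed: Replaces A's two staged forward passes (header list grown with an O(h) membership scan, then in-place mutation of every record) with one recursive traversal that threads the ordered key-union downward as a dict and, repmin-style, receives the final union back from the base case to pad each record via setdefault while the output is assembled back-to-front.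
import Mathlib
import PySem

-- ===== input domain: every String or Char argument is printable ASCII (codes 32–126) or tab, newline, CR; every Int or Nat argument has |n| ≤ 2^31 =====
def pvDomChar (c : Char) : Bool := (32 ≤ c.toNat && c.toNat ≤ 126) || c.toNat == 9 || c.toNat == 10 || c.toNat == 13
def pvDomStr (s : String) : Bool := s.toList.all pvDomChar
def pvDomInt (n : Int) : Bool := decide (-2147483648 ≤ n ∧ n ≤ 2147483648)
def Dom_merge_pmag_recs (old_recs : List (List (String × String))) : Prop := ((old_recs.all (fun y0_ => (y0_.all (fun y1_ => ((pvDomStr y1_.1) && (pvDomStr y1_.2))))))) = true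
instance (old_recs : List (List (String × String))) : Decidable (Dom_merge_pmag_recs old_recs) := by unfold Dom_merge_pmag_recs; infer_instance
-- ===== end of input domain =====

-- B replaces A's two staged forward passes by ONE recursive traversal that threads the ordered
-- key-union downward as a dict and pads each record on the way back up with the final union
-- returned from the base case (objective: alternative decomposition, same cost class).

-- ===== PORT A =====
-- deepcopy is the identity on these pure string records; rec[header]="" appends (header absent).
def merge_pmag_recs (old_recs : List (List (String × String))) : List (List (String × String)) :=
  let recs := old_recs
  let headers := recs.foldl (fun hs rec =>
    rec.foldl (fun hs kv => if hs.contains kv.1 then hs else hs ++ [kv.1]) hs) []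
  recs.map (fun rec =>
    headers.foldl (fun r h => if (r.map Prod.fst).contains h then r else r ++ [(h, "")]) rec)

-- ===== PORT B =====
-- go(pairs, seen): 'nseen[k] = ""' is Dict.insert; 'for h in final: filled.setdefault(h, "")'
-- on the dict head: keep the pair if the key is present, else append (h, "") — exact here.
def mergeGo (pairs : List (List (String × String))) (seen : PySem.Dict String String) :
    PySem.Dict String String × List (List (String × String)) :=
  match pairs with
  | [] => (seen, [])
  | head :: tail =>
      let res := mergeGo tail (head.foldl (fun s kv => s.insert kv.1 "") seen)
      let filled := res.1.keys.foldl
        (fun r h => if (r.map Prod.fst).contains h then r else r ++ [(h, "")]) head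
      (res.1, filled :: res.2)

def merge_pmag_recs_alt (old_recs : List (List (String × String))) : List (List (String × String)) :=
  (mergeGo old_recs PySem.Dict.empty).2

-- ===== PRECONDITION & SPEC =====
def Spec_merge_pmag_recs (old_recs : List (List (String × String))) (out : List (List (String × String))) : Prop := out = merge_pmag_recs_alt old_recs
instance (old_recs : List (List (String × String))) (out : List (List (String × String))) : Decidable (Spec_merge_pmag_recs old_recs out) := by unfold Spec_merge_pmag_recs; infer_instance

-- ===== CLAIM (what is proved, stated in full; the proofs are below) =====
def Claim_equal_merge_pmag_recs : Prop := ∀ (old_recs : List (List (String × String))), Dom_merge_pmag_recs old_recs → Spec_merge_pmag_recs old_recs (merge_pmag_recs old_recs)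

-- ===== LEMMAS AND PROOFS =====

-- B's recursion in closed form: the first component is the dict-union threaded over all records,
-- and every record is padded with the keys of that SAME final union.
theorem mergeGo_eq (pairs : List (List (String × String))) (seen : PySem.Dict String String) :
    mergeGo pairs seen =
      (pairs.foldl (fun s rec => rec.foldl (fun s kv => s.insert kv.1 "") s) seen,
       pairs.map (fun rec =>
         (pairs.foldl (fun s rec => rec.foldl (fun s kv => s.insert kv.1 "") s) seen).keys.foldl
           (fun r h => if (r.map Prod.fst).contains h then r else r ++ [(h, "")]) rec)) := by
  induction pairs generalizing seen with
  | nil => simp [mergeGo]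
  | cons head tail ih =>
      simp only [mergeGo, ih, List.foldl_cons, List.map_cons]

-- The keys of B's threaded dict-union are exactly A's header list (same fold, key side only).
theorem keys_union_eq (pairs : List (List (String × String))) (s : PySem.Dict String String) :
    (pairs.foldl (fun s rec => rec.foldl (fun s kv => s.insert kv.1 "") s) s).keys
    = pairs.foldl (fun hs rec =>
        rec.foldl (fun hs kv => if hs.contains kv.1 then hs else hs ++ [kv.1]) hs) s.keys := by
  induction pairs generalizing s with
  | nil => rfl
  | cons head tail ih =>
      simp only [List.foldl_cons]
      rw [ih]
      have h1 : (head.foldl (fun s kv => s.insert kv.1 "") s).keys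
          = PySem.Set.update s.keys (head.map Prod.fst) :=
        PySem.Dict.keys_foldl_insert_key head Prod.fst (fun _ _ => "") s
      have h2 : head.foldl (fun hs kv => if hs.contains kv.1 then hs else hs ++ [kv.1]) s.keys
          = PySem.Set.update s.keys (head.map Prod.fst) := by
        rw [PySem.Set.update_map_eq_foldl_add]; rfl
      rw [h1, h2]

theorem merge_pmag_recs_eq (old_recs : List (List (String × String))) :
    merge_pmag_recs old_recs = merge_pmag_recs_alt old_recs := by
  show _ = (mergeGo old_recs PySem.Dict.empty).2
  rw [mergeGo_eq, keys_union_eq]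
  rfl

-- ===== VERDICT (by name: the statement is the Claim_ definition above) =====
theorem merge_pmag_recs_spec : Claim_equal_merge_pmag_recs := by
  intro old_recs _
  unfold Spec_merge_pmag_recs
  exact merge_pmag_recs_eq old_recs
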